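-- pv_equiv track=rewrite | github.com/alancast/LeetCodeProblems | python/medium/1102_maxMinPath.py | maximumMinimumPath
-- ===== SOURCE A (Python) =====
-- import heapq
-- from typing import List
--
-- def maximumMinimumPath(grid: List[List[int]]) -> int:
--     rows = len(grid)
--     cols = len(grid[0])
--
--     # 4 directions to a cell's possible neighbors.
--     dirs = [(1, 0), (0, 1), (-1, 0), (0, -1)]
--
--     heap = []
--     answer = grid[0][0]
--
--     # Initalize the status of all the cells as 0 (unvisited).
--     visited = [[False] * cols for _ in range(rows)]
--
--     # Put the top-left cell to the priority queue and mark it as True (visited).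
--     # Notice that we save the negative number of cell's value, thus we can always
--     # pop out the cell with the maximum value using a min-heap data structure.
--     heapq.heappush(heap, (-grid[0][0], 0, 0))
--     visited[0][0] = True
--
--     # While the priority queue is not empty.
--     while heap:
--         # Pop the cell with the largest value.
--         cur_val, cur_row, cur_col = heapq.heappop(heap)
--
--         # Update the minimum value we have visited so far.
--         answer = min(answer, -cur_val)
--
--         # If we reach the bottom-right cell we know our max min and can stop
--         if cur_row == rows - 1 and cur_col == cols - 1:
--             return answer
--
--         for d_row, d_col in dirs:
--             new_row = cur_row + d_row
--             new_col = cur_col + d_col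
--
--             # Check if the current cell has any in bounds unvisited neighbors.
--             if 0 <= new_row < rows and 0 <= new_col < cols and not visited[new_row][new_col]:
--                 # If so, we put this neighbor to the priority queue and mark it as visited.
--                 heapq.heappush(heap, (-grid[new_row][new_col], new_row, new_col))
--                 visited[new_row][new_col] = True
-- ===== SOURCE B (Python) =====
-- def maximumMinimumPath(grid):
--     rows = len(grid)
--     cols = len(grid[0])
--     vals = sorted({grid[r][c] for r in range(rows) for c in range(cols)}, reverse=True)
--     # binary search for the first (largest) threshold that still connects the corners;
--     # _connected is monotone along the descending value list, and the smallest value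
--     # always connects, so the search is well defined
--     lo, hi = 0, len(vals) - 1
--     while lo < hi:
--         mid = (lo + hi) // 2
--         if _connected(grid, rows, cols, vals[mid]):
--             hi = mid
--         else:
--             lo = mid + 1
--     return vals[lo]
--
--
-- def _connected(grid, rows, cols, t):
--     """Is the bottom-right cell flood-reachable from (0,0) using only cells >= t?"""
--     if grid[0][0] < t:
--         return False
--     seen = [[False] * cols for _ in range(rows)]
--     seen[0][0] = True
--     stack = [(0, 0)]
--     while stack:
--         r, c = stack.pop()
--         for nr, nc in ((r + 1, c), (r - 1, c), (r, c + 1), (r, c - 1)):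
--             if 0 <= nr < rows and 0 <= nc < cols and not seen[nr][nc] and grid[nr][nc] >= t:
--                 seen[nr][nc] = True
--                 stack.append((nr, nc))
--     return seen[rows - 1][cols - 1]
-- ===== Notes on version B (the rewrite author's own statement) =====
-- stated objective: alternative
-- what changed: A grows a best-first region with a max-heap (Dijkstra/Prim style) and returns the running min when the bottom-right cell is popped; B instead sorts the distinct cell values in descending order and binary-searches for the first threshold t at which a flood fill over the cells with value >= t connects (0,0) to (rows-1,cols-1).
-- outside the precondition, e.g. on maximumMinimumPath([[9, 1, 1], [9, 5], [9, 9, 9]]): A returns 9, B raises IndexError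
import Mathlib
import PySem

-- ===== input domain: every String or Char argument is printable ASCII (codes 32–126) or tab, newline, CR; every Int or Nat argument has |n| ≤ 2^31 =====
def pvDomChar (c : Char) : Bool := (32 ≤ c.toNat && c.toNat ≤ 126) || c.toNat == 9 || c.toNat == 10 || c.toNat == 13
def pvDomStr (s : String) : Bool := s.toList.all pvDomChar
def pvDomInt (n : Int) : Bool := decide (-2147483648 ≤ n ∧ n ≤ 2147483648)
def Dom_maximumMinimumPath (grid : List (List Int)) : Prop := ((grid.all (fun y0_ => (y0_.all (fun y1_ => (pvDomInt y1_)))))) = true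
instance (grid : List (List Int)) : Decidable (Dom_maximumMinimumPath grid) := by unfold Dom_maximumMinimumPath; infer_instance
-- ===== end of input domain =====

-- B replaces A's best-first max-heap growth by a descending scan over the distinct cell
-- values with a flood-fill connectivity test per value (alternative algorithm, not faster).

-- ===== PORT A =====
-- grid[r][c] (indices are guarded to be in range before every use, as in Python;
-- the 0 default is never reached on Pre_)
def pvGet2 (g : List (List Int)) (r c : Int) : Int :=
  (((PySem.List.pyGet? g r).bind (fun row => PySem.List.pyGet? row c)).getD 0)

def pvGetB (v : List (List Bool)) (r c : Int) : Bool :=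
  (((PySem.List.pyGet? v r).bind (fun row => PySem.List.pyGet? row c)).getD false)

-- visited[r][c] = True; only called with 0 ≤ r, c (bounds-checked first, as in Python)
def pvSetB (v : List (List Bool)) (r c : Int) : List (List Bool) :=
  v.set r.toNat ((v.getD r.toNat []).set c.toNat true)

-- heapq holds pairwise-distinct (-value, row, col) triples, so heappop returns the
-- lexicographically least triple: exact for A's heap usage.
def pvLexLt (x y : Int × Int × Int) : Bool :=
  x.1 < y.1 || (x.1 == y.1 && (x.2.1 < y.2.1 || (x.2.1 == y.2.1 && x.2.2 < y.2.2)))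

def pvHeapMin (x : Int × Int × Int) (xs : List (Int × Int × Int)) : Int × Int × Int :=
  xs.foldl (fun m y => if pvLexLt y m then y else m) x

-- one step of A's `for d_row, d_col in dirs` body, state = (heap, visited)
def pvStepDir (grid : List (List Int)) (rows cols cr cc : Int)
    (st : List (Int × Int × Int) × List (List Bool)) (d : Int × Int) :
    List (Int × Int × Int) × List (List Bool) :=
  let nr := cr + d.1
  let nc := cc + d.2
  if decide (0 ≤ nr) && decide (nr < rows) && decide (0 ≤ nc) && decide (nc < cols)
      && !pvGetB st.2 nr nc then
    (st.1 ++ [(-(pvGet2 grid nr nc), nr, nc)], pvSetB st.2 nr nc)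
  else st

-- A's while-loop; fuel rows*cols+1 is provably enough (each iteration pops one cell,
-- each cell is pushed at most once); the fuel-0/empty-heap defaults are never reached on Pre_
def pvALoop (grid : List (List Int)) (rows cols : Int) :
    Nat → List (Int × Int × Int) → List (List Bool) → Int → Int
  | 0, _, _, answer => answer
  | _ + 1, [], _, answer => answer
  | fuel + 1, x :: xs, visited, answer =>
    let cur := pvHeapMin x xs
    let rest := (x :: xs).erase cur
    let answer' := min answer (-cur.1)
    if cur.2.1 == rows - 1 && cur.2.2 == cols - 1 then answer'
    else
      let st := ([((1 : Int), (0 : Int)), (0, 1), (-1, 0), (0, -1)]).foldl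
        (pvStepDir grid rows cols cur.2.1 cur.2.2) (rest, visited)
      pvALoop grid rows cols fuel st.1 st.2 answer'

def maximumMinimumPath (grid : List (List Int)) : Int :=
  let rows : Int := grid.length
  let cols : Int := (grid.headD []).length
  let a0 := pvGet2 grid 0 0
  let visited0 := pvSetB (List.replicate rows.toNat (List.replicate cols.toNat false)) 0 0
  pvALoop grid rows cols (rows.toNat * cols.toNat + 1) [(-a0, 0, 0)] visited0 a0

-- ===== PORT B =====
-- B's DFS flood fill at threshold t; the Lean stack keeps its top at the HEAD, which is
-- exactly Python's append/pop() on the list's tail; fuel rows*cols+1 is provably enough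
def pvBLoop (grid : List (List Int)) (rows cols t : Int) :
    Nat → List (Int × Int) → List (List Bool) → List (List Bool)
  | 0, _, seen => seen
  | _ + 1, [], seen => seen
  | fuel + 1, (r, c) :: rest, seen =>
    let st := ([(r + 1, c), (r - 1, c), (r, c + 1), (r, c - 1)]).foldl
      (fun (st : List (Int × Int) × List (List Bool)) q =>
        if decide (0 ≤ q.1) && decide (q.1 < rows) && decide (0 ≤ q.2) && decide (q.2 < cols)
            && !pvGetB st.2 q.1 q.2 && decide (t ≤ pvGet2 grid q.1 q.2) then
          (q :: st.1, pvSetB st.2 q.1 q.2)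
        else st) (rest, seen)
    pvBLoop grid rows cols t fuel st.1 st.2

def pvConnected (grid : List (List Int)) (rows cols t : Int) : Bool :=
  if pvGet2 grid 0 0 < t then false
  else
    let seen0 := pvSetB (List.replicate rows.toNat (List.replicate cols.toNat false)) 0 0
    let seen := pvBLoop grid rows cols t (rows.toNat * cols.toNat + 1) [(0, 0)] seen0
    pvGetB seen (rows - 1) (cols - 1)

-- B's `while lo < hi` binary search over the descending value list; fuel vals.length
-- is provably enough (hi - lo at least halves each round); indices are in range, so
-- the getD defaults are never reached on Pre_
def pvBSearch (grid : List (List Int)) (rows cols : Int) (vals : List Int) :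
    Nat → Nat → Nat → Int
  | 0, lo, _ => vals.getD lo 0
  | fuel + 1, lo, hi =>
    if lo < hi then
      let mid := (lo + hi) / 2
      if pvConnected grid rows cols (vals.getD mid 0) then
        pvBSearch grid rows cols vals fuel lo mid
      else
        pvBSearch grid rows cols vals fuel (mid + 1) hi
    else vals.getD lo 0

def maximumMinimumPath_alt (grid : List (List Int)) : Int :=
  let rows : Int := grid.length
  let cols : Int := (grid.headD []).length
  let vals := PySem.List.sorted
    (PySem.Set.ofList ((PySem.List.pyRange 0 rows 1).flatMap
      (fun r => (PySem.List.pyRange 0 cols 1).map (fun c => pvGet2 grid r c))))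
    (fun x => x) true
  pvBSearch grid rows cols vals vals.length 0 (vals.length - 1)

-- ===== PRECONDITION & SPEC =====
-- Pre_ excludes the empty grid and grids whose first row is empty, on which A raises
-- IndexError, and grids having some row shorter than the first row, on which A raises
-- IndexError whenever its best-first search touches a missing cell and otherwise returns
-- a value depending on its visit order (B raises IndexError on all such grids).
def Pre_maximumMinimumPath (grid : List (List Int)) : Prop :=
  grid ≠ [] ∧ 0 < (grid.headD []).length ∧
    ∀ row ∈ grid, (grid.headD []).length ≤ row.length

instance (grid : List (List Int)) : Decidable (Pre_maximumMinimumPath grid) := by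
  unfold Pre_maximumMinimumPath; infer_instance

def pvWitness_maximumMinimumPath : List (List Int) := [[5, 4, 2], [1, 3, 3]]

def Spec_maximumMinimumPath (grid : List (List Int)) (out : Int) : Prop :=
  out = maximumMinimumPath_alt grid
instance (grid : List (List Int)) (out : Int) : Decidable (Spec_maximumMinimumPath grid out) := by
  unfold Spec_maximumMinimumPath; infer_instance

-- ===== CLAIM (what is proved, stated in full; the proofs are below) =====
def Claim_equal_maximumMinimumPath : Prop := ∀ (grid : List (List Int)),
  Dom_maximumMinimumPath grid → Pre_maximumMinimumPath grid →
    Spec_maximumMinimumPath grid (maximumMinimumPath grid)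

-- ===== LEMMAS AND PROOFS =====

-- ---------- basic geometric notions ----------

def pvVal (g : List (List Int)) (p : Int × Int) : Int := pvGet2 g p.1 p.2

def pvInb (rows cols : Int) (p : Int × Int) : Prop :=
  0 ≤ p.1 ∧ p.1 < rows ∧ 0 ≤ p.2 ∧ p.2 < cols

def pvAdj (p q : Int × Int) : Prop :=
  (q.1 = p.1 + 1 ∧ q.2 = p.2) ∨ (q.1 = p.1 - 1 ∧ q.2 = p.2) ∨
  (q.1 = p.1 ∧ q.2 = p.2 + 1) ∨ (q.1 = p.1 ∧ q.2 = p.2 - 1)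

/-- Reachability from (0,0) through in-bounds cells of value ≥ t. -/
inductive pvReach (g : List (List Int)) (rows cols t : Int) : Int × Int → Prop
  | start : t ≤ pvVal g (0, 0) → pvReach g rows cols t (0, 0)
  | step {p q} : pvReach g rows cols t p → pvInb rows cols q → pvAdj p q →
      t ≤ pvVal g q → pvReach g rows cols t q

def pvShape (v : List (List Bool)) (rows cols : Int) : Prop :=
  v.length = rows.toNat ∧ ∀ i (h : i < v.length), v[i].length = cols.toNat

def pvCells (h : List (Int × Int × Int)) : List (Int × Int) := h.map (fun x => x.2)

-- ---------- pvReach basics ----------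

theorem pvReach_le_val {g : List (List Int)} {rows cols t : Int} {p : Int × Int}
    (h : pvReach g rows cols t p) : t ≤ pvVal g p := by
  cases h with
  | start h => exact h
  | step _ _ _ h => exact h

theorem pvReach_mono {g : List (List Int)} {rows cols s t : Int} {p : Int × Int}
    (hst : s ≤ t) (h : pvReach g rows cols t p) : pvReach g rows cols s p := by
  induction h with
  | start h => exact .start (le_trans hst h)
  | step _ hin hadj hv ih => exact .step ih hin hadj (le_trans hst hv)

theorem pvReach_start_le {g : List (List Int)} {rows cols t : Int} {p : Int × Int}
    (h : pvReach g rows cols t p) : t ≤ pvVal g (0, 0) := by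
  induction h with
  | start h => exact h
  | step _ _ _ _ ih => exact ih

-- ---------- 2D boolean array lemmas ----------

theorem pvGetB_nonneg {v : List (List Bool)} {r c : Int} (hr : 0 ≤ r) (hc : 0 ≤ c) :
    pvGetB v r c = (v.getD r.toNat []).getD c.toNat false := by
  simp only [pvGetB, PySem.List.pyGet?_of_nonneg v hr, List.getD_eq_getElem?_getD]
  cases h : v[r.toNat]? with
  | none => simp
  | some row => simp [PySem.List.pyGet?_of_nonneg row hc]

theorem pvShape_setB {v : List (List Bool)} {rows cols : Int} (hs : pvShape v rows cols)
    {a b : Int} (_hq : pvInb rows cols (a, b)) : pvShape (pvSetB v a b) rows cols := by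
  obtain ⟨hlen, hrow⟩ := hs
  refine ⟨by simp [pvSetB, hlen], ?_⟩
  intro i h
  simp only [pvSetB, List.length_set] at h
  simp only [pvSetB]
  rw [List.getElem_set]
  split
  · next he =>
    subst he
    rw [List.getD_eq_getElem v [] h]
    simp [hrow _ h]
  · exact hrow _ h

theorem pvGetB_setB {v : List (List Bool)} {rows cols : Int} (hs : pvShape v rows cols)
    {a b r c : Int} (hq : pvInb rows cols (a, b)) (hp : pvInb rows cols (r, c)) :
    pvGetB (pvSetB v a b) r c = if r = a ∧ c = b then true else pvGetB v r c := by
  have ha0 : 0 ≤ a := hq.1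
  have hb0 : 0 ≤ b := hq.2.2.1
  have hr0 : 0 ≤ r := hp.1
  have hc0 : 0 ≤ c := hp.2.2.1
  have han : a.toNat < v.length := by rw [hs.1]; have := hq.2.1; omega
  have hrowlen : (v.getD a.toNat []).length = cols.toNat := by
    rw [List.getD_eq_getElem v [] han]; exact hs.2 _ han
  simp only [pvGetB_nonneg hr0 hc0]
  simp only [pvSetB, List.getD_eq_getElem?_getD, List.getElem?_set]
  by_cases hra : r = a
  · subst hra
    simp only [if_pos han]
    by_cases hcb : c = b
    · subst hcb
      have hbn : c.toNat < (v[r.toNat]?.getD []).length := by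
        rw [← List.getD_eq_getElem?_getD, hrowlen]
        have := hq.2.2.2; omega
      simp [hbn]
    · have hne : b.toNat ≠ c.toNat := by omega
      simp [hne, hcb]
  · have hne : a.toNat ≠ r.toNat := by omega
    simp [hne, hra]

theorem pvShape_replicate {rows cols : Int} :
    pvShape (List.replicate rows.toNat (List.replicate cols.toNat false)) rows cols := by
  exact ⟨by simp, by intro i h; simp⟩

theorem pvGetB_replicate {rows cols : Int} {r c : Int} (hp : pvInb rows cols (r, c)) :
    pvGetB (List.replicate rows.toNat (List.replicate cols.toNat false)) r c = false := by
  rw [pvGetB_nonneg hp.1 hp.2.2.1]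
  have h1 : r.toNat < rows.toNat := by have := hp.2.1; have := hp.1; omega
  have h2 : c.toNat < cols.toNat := by have := hp.2.2.2; have := hp.2.2.1; omega
  simp [List.getD_eq_getElem?_getD, h1, h2]

theorem pvGetB_init {rows cols : Int} {r c : Int} (h00 : pvInb rows cols ((0 : Int), (0 : Int)))
    (hp : pvInb rows cols (r, c)) :
    pvGetB (pvSetB (List.replicate rows.toNat (List.replicate cols.toNat false)) 0 0) r c
      = if r = 0 ∧ c = 0 then true else false := by
  rw [pvGetB_setB pvShape_replicate h00 hp]
  split
  · rfl
  · exact pvGetB_replicate hp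

theorem pvNodup_length_le {rows cols : Int} {P : List (Int × Int)} (hn : P.Nodup)
    (hb : ∀ p ∈ P, pvInb rows cols p) : P.length ≤ rows.toNat * cols.toNat := by
  classical
  have hcard : P.length = P.toFinset.card := (List.toFinset_card_of_nodup hn).symm
  have hsub : P.toFinset ⊆ (Finset.range rows.toNat ×ˢ Finset.range cols.toNat).image
      (fun ab => ((ab.1 : Int), (ab.2 : Int))) := by
    intro p hp
    rw [List.mem_toFinset] at hp
    obtain ⟨h1, h2, h3, h4⟩ := hb p hp
    refine Finset.mem_image.2 ⟨(p.1.toNat, p.2.toNat), ?_, ?_⟩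
    · rw [Finset.mem_product]
      constructor <;> (rw [Finset.mem_range]; omega)
    · obtain ⟨pa, pb⟩ := p
      simp only [Prod.mk.injEq]
      constructor <;> omega
  calc P.length = P.toFinset.card := hcard
    _ ≤ _ := Finset.card_le_card hsub
    _ ≤ (Finset.range rows.toNat ×ˢ Finset.range cols.toNat).card := Finset.card_image_le
    _ = rows.toNat * cols.toNat := by simp

theorem pvAdj_delta {p q : Int × Int} (h : pvAdj p q) :
    ∃ d ∈ [((1 : Int), (0 : Int)), (0, 1), (-1, 0), (0, -1)],
      q = (p.1 + d.1, p.2 + d.2) := by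
  obtain ⟨q1, q2⟩ := q
  rcases h with ⟨h1, h2⟩ | ⟨h1, h2⟩ | ⟨h1, h2⟩ | ⟨h1, h2⟩ <;> dsimp only at h1 h2
  · exact ⟨(1, 0), by simp, by simp only [Prod.mk.injEq]; constructor <;> omega⟩
  · exact ⟨(-1, 0), by simp, by simp only [Prod.mk.injEq]; constructor <;> omega⟩
  · exact ⟨(0, 1), by simp, by simp only [Prod.mk.injEq]; constructor <;> omega⟩
  · exact ⟨(0, -1), by simp, by simp only [Prod.mk.injEq]; constructor <;> omega⟩

theorem pvAdj_of_delta {p : Int × Int} {d : Int × Int}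
    (hd : d ∈ [((1 : Int), (0 : Int)), (0, 1), (-1, 0), (0, -1)]) :
    pvAdj p (p.1 + d.1, p.2 + d.2) := by
  fin_cases hd <;> simp [pvAdj] <;> try omega

theorem pvAdj_iff_mem {r c : Int} {q : Int × Int} :
    pvAdj (r, c) q ↔ q ∈ [(r + 1, c), (r - 1, c), (r, c + 1), (r, c - 1)] := by
  obtain ⟨q1, q2⟩ := q
  simp only [pvAdj, List.mem_cons, Prod.mk.injEq, List.not_mem_nil, or_false]

theorem pvHeapMin_mem (x : Int × Int × Int) (xs : List (Int × Int × Int)) :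
    pvHeapMin x xs ∈ x :: xs := by
  induction xs generalizing x with
  | nil => simp [pvHeapMin]
  | cons y ys ih =>
    have hrw : pvHeapMin x (y :: ys) = pvHeapMin (if pvLexLt y x then y else x) ys := rfl
    rw [hrw]
    rcases List.mem_cons.1 (ih (if pvLexLt y x then y else x)) with h | h
    · rw [h]; split <;> simp
    · simp [h]

theorem pvHeapMin_fst_le (x : Int × Int × Int) (xs : List (Int × Int × Int)) :
    ∀ y ∈ x :: xs, (pvHeapMin x xs).1 ≤ y.1 := by
  induction xs generalizing x with
  | nil => intro y hy; simp at hy; simp [pvHeapMin, hy]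
  | cons z zs ih =>
    have hrw : pvHeapMin x (z :: zs) = pvHeapMin (if pvLexLt z x then z else x) zs := rfl
    have hm1 : (if pvLexLt z x then z else x).1 ≤ x.1 := by
      split
      · next hlt => simp [pvLexLt] at hlt; omega
      · exact le_refl _
    have hm2 : (if pvLexLt z x then z else x).1 ≤ z.1 := by
      split
      · exact le_refl _
      · next hlt => simp [pvLexLt] at hlt; omega
    have hself := ih (if pvLexLt z x then z else x) _ List.mem_cons_self
    intro y hy
    rcases List.mem_cons.1 hy with h | h
    · subst h; rw [hrw]; exact le_trans hself hm1
    · rcases List.mem_cons.1 h with h2 | h2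
      · subst h2; rw [hrw]; exact le_trans hself hm2
      · rw [hrw]; exact ih _ y (List.mem_cons.2 (Or.inr h2))


-- the initial visited/seen array: exactly (0,0) is marked
-- ---------- pigeonhole: a nodup list of in-bounds cells has at most rows*cols elements ----------

-- ---------- a path to the bottom-right cell always exists ----------

theorem pvFoldlMin_le_init (xs : List Int) (a : Int) : xs.foldl min a ≤ a := by
  induction xs generalizing a with
  | nil => exact le_refl _
  | cons y ys ih => exact le_trans (ih (min a y)) (min_le_left _ _)

theorem pvFoldlMin_le {xs : List Int} {a x : Int} (hx : x ∈ xs) : xs.foldl min a ≤ x := by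
  induction xs generalizing a with
  | nil => simp at hx
  | cons y ys ih =>
    rcases List.mem_cons.1 hx with h | h
    · subst h
      exact le_trans (pvFoldlMin_le_init ys (min a x)) (min_le_right _ _)
    · exact ih h

theorem pvGet2_nonneg {g : List (List Int)} {r c : Int} (hr : 0 ≤ r) (hc : 0 ≤ c) :
    pvGet2 g r c = (g.getD r.toNat []).getD c.toNat 0 := by
  simp only [pvGet2, PySem.List.pyGet?_of_nonneg g hr, List.getD_eq_getElem?_getD]
  cases h : g[r.toNat]? with
  | none => simp
  | some row => simp [PySem.List.pyGet?_of_nonneg row hc]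

theorem pvVal_eq_getElem {g : List (List Int)} {rows cols : Int}
    (hrows : rows = (g.length : Int)) (hcols : cols = ((g.headD []).length : Int))
    (hpre : Pre_maximumMinimumPath g) {p : Int × Int} (hp : pvInb rows cols p) :
    ∃ row ∈ g, ∃ x ∈ row, pvVal g p = x := by
  obtain ⟨h1, h2, h3, h4⟩ := hp
  have hrn : p.1.toNat < g.length := by omega
  have hrowmem : g[p.1.toNat] ∈ g := List.getElem_mem _
  have hlen : cols ≤ (g[p.1.toNat] : List Int).length := by
    have := hpre.2.2 _ hrowmem
    omega
  have hcn : p.2.toNat < (g[p.1.toNat] : List Int).length := by omega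
  refine ⟨g[p.1.toNat], hrowmem, (g[p.1.toNat])[p.2.toNat], List.getElem_mem _, ?_⟩
  rw [pvVal, pvGet2_nonneg h1 h3, List.getD_eq_getElem g [] hrn,
    List.getD_eq_getElem _ _ hcn]

theorem pvExists_reach_end {g : List (List Int)} {rows cols : Int}
    (hrows : rows = (g.length : Int)) (hcols : cols = ((g.headD []).length : Int))
    (hpre : Pre_maximumMinimumPath g) :
    ∃ t, pvReach g rows cols t (rows - 1, cols - 1) := by
  have hr1 : (1 : Int) ≤ rows := by
    rw [hrows]
    have := hpre.1
    cases g <;> simp_all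
  have hc1 : (1 : Int) ≤ cols := by rw [hcols]; exact_mod_cast hpre.2.1
  set t0 := (g.flatMap id).foldl min (pvVal g (0, 0)) with ht0
  have hmin : ∀ p, pvInb rows cols p → t0 ≤ pvVal g p := by
    intro p hp
    obtain ⟨row, hrow, x, hx, hval⟩ := pvVal_eq_getElem hrows hcols hpre hp
    rw [hval]
    exact pvFoldlMin_le (List.mem_flatMap.2 ⟨row, hrow, by simpa using hx⟩)
  have h00 : pvInb rows cols (0, 0) := ⟨le_refl _, by omega, le_refl _, by omega⟩
  have hrowWalk : ∀ n : Nat, (n : Int) < cols → pvReach g rows cols t0 (0, (n : Int)) := by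
    intro n
    induction n with
    | zero => intro _; exact .start (hmin _ h00)
    | succ k ih =>
      intro hk
      push_cast at hk ⊢
      have hq : pvInb rows cols (0, (k : Int) + 1) := ⟨le_refl _, by omega, by omega, hk⟩
      exact .step (ih (by omega)) hq (Or.inr (Or.inr (Or.inl ⟨rfl, rfl⟩))) (hmin _ hq)
  have hlast : pvReach g rows cols t0 (0, cols - 1) := by
    have := hrowWalk (cols - 1).toNat (by omega)
    have hcast : (((cols - 1).toNat : Int)) = cols - 1 := by omega
    rwa [hcast] at this
  have hcolWalk : ∀ n : Nat, (n : Int) < rows → pvReach g rows cols t0 ((n : Int), cols - 1) := by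
    intro n
    induction n with
    | zero => intro _; exact_mod_cast hlast
    | succ k ih =>
      intro hk
      push_cast at hk ⊢
      have hq : pvInb rows cols ((k : Int) + 1, cols - 1) := ⟨by omega, hk, by omega, by omega⟩
      exact .step (ih (by omega)) hq (Or.inl ⟨rfl, rfl⟩) (hmin _ hq)
  refine ⟨t0, ?_⟩
  have := hcolWalk (rows - 1).toNat (by omega)
  have hcast : (((rows - 1).toNat : Int)) = rows - 1 := by omega
  rwa [hcast] at this

-- every threshold that reaches some cell is bounded by some attained grid value that also reaches it
theorem pvReach_attained {g : List (List Int)} {rows cols t : Int} {q : Int × Int}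
    (h00 : pvInb rows cols (0, 0))
    (h : pvReach g rows cols t q) :
    ∃ w, t ≤ w ∧ pvReach g rows cols w q ∧ ∃ p, pvInb rows cols p ∧ w = pvVal g p := by
  induction h with
  | start h => exact ⟨pvVal g (0, 0), h, .start (le_refl _), ⟨(0, 0), h00, rfl⟩⟩
  | step hp hin hadj hval ih =>
    obtain ⟨w, hw1, hw2, hw3⟩ := ih
    refine ⟨min w (pvVal g _), le_min hw1 hval,
      .step (pvReach_mono (min_le_left _ _) hw2) hin hadj (min_le_right _ _), ?_⟩
    rcases min_cases w (pvVal g _) with ⟨he, _⟩ | ⟨he, _⟩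
    · rw [he]; exact hw3
    · rw [he]; exact ⟨_, hin, rfl⟩

theorem pvDims {g : List (List Int)} {rows cols : Int}
    (hrows : rows = (g.length : Int)) (hcols : cols = ((g.headD []).length : Int))
    (hpre : Pre_maximumMinimumPath g) : 1 ≤ rows ∧ 1 ≤ cols := by
  constructor
  · rw [hrows]
    have := hpre.1
    cases g <;> simp_all
  · rw [hcols]; exact_mod_cast hpre.2.1

-- ---------- the cut lemma ----------

theorem pvCut {g : List (List Int)} {rows cols : Int} {P F : List (Int × Int)}
    (hstart : (0, 0) ∈ P ∨ (0, 0) ∈ F)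
    (hclosed : ∀ p ∈ P, ∀ q, pvInb rows cols q → pvAdj p q → q ∈ P ∨ q ∈ F)
    {t : Int} {z : Int × Int} (h : pvReach g rows cols t z) :
    z ∈ P ∨ ∃ w ∈ F, pvReach g rows cols t w := by
  induction h with
  | start h =>
    rcases hstart with hs | hs
    · exact Or.inl hs
    · exact Or.inr ⟨(0, 0), hs, .start h⟩
  | @step p q hp hin hadj hval ih =>
    rcases ih with hP | hF
    · rcases hclosed p hP q hin hadj with hq | hq
      · exact Or.inl hq
      · exact Or.inr ⟨q, hq, .step hp hin hadj hval⟩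
    · exact Or.inr hF

-- ---------- adjacency vs the four deltas ----------

-- ---------- heap-minimum lemmas ----------

-- ---------- A-side loop invariant ----------

structure pvAInv (g : List (List Int)) (rows cols : Int) (heap : List (Int × Int × Int))
    (visited : List (List Bool)) (answer : Int) (P : List (Int × Int)) : Prop where
  hrows : rows = (g.length : Int)
  hcols : cols = ((g.headD []).length : Int)
  hpre : Pre_maximumMinimumPath g
  hshape : pvShape visited rows cols
  hwf : ∀ x ∈ heap, pvInb rows cols x.2 ∧ x.1 = -(pvVal g x.2)
  hPwf : ∀ p ∈ P, pvInb rows cols p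
  hnodup : (pvCells heap).Nodup
  hPnodup : P.Nodup
  hdisj : ∀ p ∈ P, p ∉ pvCells heap
  hvis : ∀ p, pvInb rows cols p →
    (pvGetB visited p.1 p.2 = true ↔ p ∈ P ∨ p ∈ pvCells heap)
  hstart : (0, 0) ∈ P ∨ (0, 0) ∈ pvCells heap
  hclosed : ∀ p ∈ P, ∀ q, pvInb rows cols q → pvAdj p q → q ∈ P ∨ q ∈ pvCells heap
  hend : ((rows - 1, cols - 1) : Int × Int) ∉ P
  hdelta : ∀ t, pvReach g rows cols t (rows - 1, cols - 1) → t ≤ answer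
  hJ : ∀ x ∈ heap, pvReach g rows cols (min answer (pvVal g x.2)) x.2

structure pvAMid (g : List (List Int)) (rows cols answer' : Int) (P' : List (Int × Int))
    (heap : List (Int × Int × Int)) (vis : List (List Bool)) : Prop where
  hshape : pvShape vis rows cols
  hwf : ∀ x ∈ heap, pvInb rows cols x.2 ∧ x.1 = -(pvVal g x.2)
  hnodup : (pvCells heap).Nodup
  hdisj : ∀ p ∈ P', p ∉ pvCells heap
  hvis : ∀ p, pvInb rows cols p → (pvGetB vis p.1 p.2 = true ↔ p ∈ P' ∨ p ∈ pvCells heap)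
  hJ : ∀ x ∈ heap, pvReach g rows cols (min answer' (pvVal g x.2)) x.2

theorem pvAFold {g : List (List Int)} {rows cols answer' cr cc : Int} {P' : List (Int × Int)}
    (hreach : pvReach g rows cols answer' (cr, cc)) :
    ∀ ds : List (Int × Int), (∀ d ∈ ds, pvAdj (cr, cc) (cr + d.1, cc + d.2)) →
    ∀ heap vis, pvAMid g rows cols answer' P' heap vis →
    pvAMid g rows cols answer' P' (ds.foldl (pvStepDir g rows cols cr cc) (heap, vis)).1
        (ds.foldl (pvStepDir g rows cols cr cc) (heap, vis)).2 ∧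
    (∀ p ∈ pvCells heap, p ∈ pvCells (ds.foldl (pvStepDir g rows cols cr cc) (heap, vis)).1) ∧
    (∀ d ∈ ds, pvInb rows cols (cr + d.1, cc + d.2) →
      (cr + d.1, cc + d.2) ∈ P' ∨
        (cr + d.1, cc + d.2) ∈ pvCells (ds.foldl (pvStepDir g rows cols cr cc) (heap, vis)).1) := by
  intro ds
  induction ds with
  | nil =>
    intro _ heap vis hmid
    exact ⟨hmid, fun p hp => hp, by simp⟩
  | cons d ds ih =>
    intro hds heap vis hmid
    by_cases hcond : (decide (0 ≤ cr + d.1) && decide (cr + d.1 < rows) && decide (0 ≤ cc + d.2)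
        && decide (cc + d.2 < cols) && !pvGetB vis (cr + d.1) (cc + d.2)) = true
    · have hparts := hcond
      simp only [Bool.and_eq_true, decide_eq_true_eq, Bool.not_eq_eq_eq_not, Bool.not_true] at hparts
      obtain ⟨⟨⟨⟨h1, h2⟩, h3⟩, h4⟩, h5⟩ := hparts
      have hin : pvInb rows cols (cr + d.1, cc + d.2) := ⟨h1, h2, h3, h4⟩
      have hfresh : (cr + d.1, cc + d.2) ∉ P' ∧ (cr + d.1, cc + d.2) ∉ pvCells heap := by
        constructor <;> (intro hmem; have := (hmid.hvis _ hin).2 (by tauto); simp [this] at h5)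
      have hstep : pvStepDir g rows cols cr cc (heap, vis) d =
          (heap ++ [(-(pvGet2 g (cr + d.1) (cc + d.2)), cr + d.1, cc + d.2)],
            pvSetB vis (cr + d.1) (cc + d.2)) := by
        simp [pvStepDir, hcond]
      have hcellsnew : pvCells (heap ++ [(-(pvGet2 g (cr + d.1) (cc + d.2)), cr + d.1, cc + d.2)])
          = pvCells heap ++ [(cr + d.1, cc + d.2)] := by
        simp [pvCells]
      have hreachq : pvReach g rows cols (min answer' (pvVal g (cr + d.1, cc + d.2)))
          (cr + d.1, cc + d.2) := by
        refine .step (pvReach_mono (min_le_left _ _) hreach) hin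
          (hds d List.mem_cons_self) (min_le_right _ _)
      have hmid' : pvAMid g rows cols answer' P'
          (heap ++ [(-(pvGet2 g (cr + d.1) (cc + d.2)), cr + d.1, cc + d.2)])
          (pvSetB vis (cr + d.1) (cc + d.2)) := by
        refine ⟨pvShape_setB hmid.hshape hin, ?_, ?_, ?_, ?_, ?_⟩
        · intro x hx
          rcases List.mem_append.1 hx with h | h
          · exact hmid.hwf x h
          · rw [List.mem_singleton] at h
            subst h
            exact ⟨hin, rfl⟩
        · rw [hcellsnew]
          refine List.nodup_append.2 ⟨hmid.hnodup, by simp, ?_⟩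
          intro a ha b hb
          rw [List.mem_singleton] at hb
          subst hb
          exact fun he => hfresh.2 (he ▸ ha)
        · intro p hp
          rw [hcellsnew, List.mem_append, List.mem_singleton]
          rintro (h | h)
          · exact hmid.hdisj p hp h
          · subst h; exact hfresh.1 hp
        · intro p hinp
          rw [pvGetB_setB hmid.hshape hin hinp, hcellsnew, List.mem_append, List.mem_singleton]
          obtain ⟨pa, pb⟩ := p
          split
          · next he =>
            have hpq : (pa, pb) = (cr + d.1, cc + d.2) := by
              simp only [Prod.mk.injEq]; exact he
            simp [hpq]
          · next he =>
            rw [hmid.hvis _ hinp]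
            constructor
            · tauto
            · rintro (h | h | h)
              · exact Or.inl h
              · exact Or.inr h
              · exact absurd (by simpa [Prod.mk.injEq] using h) he
        · intro x hx
          rcases List.mem_append.1 hx with h | h
          · exact hmid.hJ x h
          · rw [List.mem_singleton] at h
            subst h
            exact hreachq
      have hfold : (d :: ds).foldl (pvStepDir g rows cols cr cc) (heap, vis)
          = ds.foldl (pvStepDir g rows cols cr cc)
            (heap ++ [(-(pvGet2 g (cr + d.1) (cc + d.2)), cr + d.1, cc + d.2)],
              pvSetB vis (cr + d.1) (cc + d.2)) := by
        rw [List.foldl_cons, hstep]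
      obtain ⟨m1, m2, m3⟩ := ih (fun e he => hds e (List.mem_cons.2 (Or.inr he))) _ _ hmid'
      rw [hfold]
      refine ⟨m1, ?_, ?_⟩
      · intro p hp
        exact m2 p (by rw [hcellsnew, List.mem_append]; exact Or.inl hp)
      · intro e he hein
        rcases List.mem_cons.1 he with h | h
        · subst h
          right
          exact m2 _ (by rw [hcellsnew, List.mem_append, List.mem_singleton]; exact Or.inr rfl)
        · exact m3 e h hein
    · have hfold : (d :: ds).foldl (pvStepDir g rows cols cr cc) (heap, vis)
          = ds.foldl (pvStepDir g rows cols cr cc) (heap, vis) := by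
        rw [List.foldl_cons]
        congr 1
        simp only [pvStepDir, if_neg hcond]
      obtain ⟨m1, m2, m3⟩ := ih (fun e he => hds e (List.mem_cons.2 (Or.inr he))) heap vis hmid
      rw [hfold]
      refine ⟨m1, m2, ?_⟩
      intro e he hein
      rcases List.mem_cons.1 he with h | h
      · subst h
        have hb : pvGetB vis (cr + e.1) (cc + e.2) = true := by
          by_contra hb
          apply hcond
          simp only [Bool.and_eq_true, decide_eq_true_eq, Bool.not_eq_eq_eq_not, Bool.not_true]
          obtain ⟨k1, k2, k3, k4⟩ := hein
          exact ⟨⟨⟨⟨k1, k2⟩, k3⟩, k4⟩, by simpa using hb⟩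
        rcases (hmid.hvis _ hein).1 hb with h | h
        · exact Or.inl h
        · exact Or.inr (m2 _ h)
      · exact m3 e h hein

theorem pvALoop_spec {g : List (List Int)} {rows cols : Int} (fuel : Nat)
    (heap : List (Int × Int × Int)) (visited : List (List Bool)) (answer : Int)
    (P : List (Int × Int)) (inv : pvAInv g rows cols heap visited answer P)
    (hfuel : rows.toNat * cols.toNat + 1 ≤ fuel + P.length) :
    pvReach g rows cols (pvALoop g rows cols fuel heap visited answer) (rows - 1, cols - 1) ∧
    ∀ t, pvReach g rows cols t (rows - 1, cols - 1) →
      t ≤ pvALoop g rows cols fuel heap visited answer := by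
  induction fuel generalizing heap visited answer P with
  | zero =>
    have hlen := pvNodup_length_le inv.hPnodup inv.hPwf
    exact absurd hfuel (by omega)
  | succ fuel ih =>
    obtain ⟨hr1, hc1⟩ := pvDims inv.hrows inv.hcols inv.hpre
    have h00 : pvInb rows cols (0, 0) := ⟨le_refl _, by omega, le_refl _, by omega⟩
    cases heap with
    | nil =>
      obtain ⟨t, ht⟩ := pvExists_reach_end inv.hrows inv.hcols inv.hpre
      rcases pvCut inv.hstart inv.hclosed ht with h | ⟨w, hw, _⟩
      · exact absurd h inv.hend
      · simp [pvCells] at hw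
    | cons x xs =>
      have hcurmem := pvHeapMin_mem x xs
      obtain ⟨hcurin, hcurval⟩ := inv.hwf _ hcurmem
      have hansval : -(pvHeapMin x xs).1 = pvVal g (pvHeapMin x xs).2 := by
        rw [hcurval]; ring
      have hperm : (x :: xs).Perm (pvHeapMin x xs :: (x :: xs).erase (pvHeapMin x xs)) :=
        List.perm_cons_erase hcurmem
      have hcellsperm : (pvCells (x :: xs)).Perm
          ((pvHeapMin x xs).2 :: pvCells ((x :: xs).erase (pvHeapMin x xs))) := by
        simpa [pvCells] using hperm.map (fun y => y.2)
      have hnd2 := (hcellsperm.nodup_iff).1 inv.hnodup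
      have hcurnotrest : (pvHeapMin x xs).2 ∉ pvCells ((x :: xs).erase (pvHeapMin x xs)) :=
        (List.nodup_cons.1 hnd2).1
      have hndrest := (List.nodup_cons.1 hnd2).2
      have hmemcells : ∀ p, p ∈ pvCells (x :: xs) ↔
          p = (pvHeapMin x xs).2 ∨ p ∈ pvCells ((x :: xs).erase (pvHeapMin x xs)) := by
        intro p
        rw [hcellsperm.mem_iff, List.mem_cons]
      have hdeltaNew : ∀ t, pvReach g rows cols t (rows - 1, cols - 1) →
          t ≤ min answer (-(pvHeapMin x xs).1) := by
        intro t ht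
        refine le_min (inv.hdelta t ht) ?_
        rcases pvCut inv.hstart inv.hclosed ht with h | ⟨w, hw, hwreach⟩
        · exact absurd h inv.hend
        · obtain ⟨y, hy, hy2⟩ := List.mem_map.1 hw
          have hyval := (inv.hwf y hy).2
          have hle := pvHeapMin_fst_le x xs y hy
          have htw := pvReach_le_val hwreach
          rw [← hy2] at htw
          omega
      have hfuel2 : rows.toNat * cols.toNat + 1 ≤ fuel + ((pvHeapMin x xs).2 :: P).length := by
        simp only [List.length_cons]
        omega
      have hunf : pvALoop g rows cols (fuel + 1) (x :: xs) visited answer =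
          (if (pvHeapMin x xs).2.1 == rows - 1 && (pvHeapMin x xs).2.2 == cols - 1 then
            min answer (-(pvHeapMin x xs).1)
          else
            pvALoop g rows cols fuel
              (([((1 : Int), (0 : Int)), (0, 1), (-1, 0), (0, -1)]).foldl
                (pvStepDir g rows cols (pvHeapMin x xs).2.1 (pvHeapMin x xs).2.2)
                ((x :: xs).erase (pvHeapMin x xs), visited)).1
              (([((1 : Int), (0 : Int)), (0, 1), (-1, 0), (0, -1)]).foldl
                (pvStepDir g rows cols (pvHeapMin x xs).2.1 (pvHeapMin x xs).2.2)
                ((x :: xs).erase (pvHeapMin x xs), visited)).2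
              (min answer (-(pvHeapMin x xs).1))) := rfl
      by_cases hcond : ((pvHeapMin x xs).2.1 == rows - 1 && (pvHeapMin x xs).2.2 == cols - 1) = true
      · -- the bottom-right cell is popped: the loop returns min answer (value of the cell)
        have hend_eq : (pvHeapMin x xs).2 = (rows - 1, cols - 1) := by
          simp only [Bool.and_eq_true, beq_iff_eq] at hcond
          obtain ⟨hc1', hc2'⟩ := hcond
          exact Prod.ext hc1' hc2'
        rw [hunf, if_pos hcond]
        constructor
        · have := inv.hJ _ hcurmem
          rw [← hansval] at this
          rwa [hend_eq] at this
        · exact hdeltaNew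
      · have hneq : (pvHeapMin x xs).2 ≠ (rows - 1, cols - 1) := by
          intro he
          apply hcond
          simp only [Bool.and_eq_true, beq_iff_eq]
          exact ⟨by rw [he], by rw [he]⟩
        have hreach' : pvReach g rows cols (min answer (-(pvHeapMin x xs).1))
            ((pvHeapMin x xs).2.1, (pvHeapMin x xs).2.2) := by
          have := inv.hJ _ hcurmem
          rw [← hansval] at this
          exact this
        have hmid : pvAMid g rows cols (min answer (-(pvHeapMin x xs).1))
            ((pvHeapMin x xs).2 :: P) ((x :: xs).erase (pvHeapMin x xs)) visited := by
          refine ⟨inv.hshape, ?_, hndrest, ?_, ?_, ?_⟩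
          · intro y hy
            exact inv.hwf y (List.mem_of_mem_erase hy)
          · intro p hp
            rcases List.mem_cons.1 hp with h | h
            · subst h; exact hcurnotrest
            · intro hc
              exact inv.hdisj p h ((hmemcells p).2 (Or.inr hc))
          · intro p hinp
            rw [inv.hvis p hinp, hmemcells p, List.mem_cons]
            tauto
          · intro y hy
            have := inv.hJ y (List.mem_of_mem_erase hy)
            exact pvReach_mono (le_min (le_trans (min_le_left _ _) (min_le_left _ _))
              (min_le_right _ _)) this
        obtain ⟨hmid2, hmono, hcov⟩ := pvAFold hreach'
          [((1 : Int), (0 : Int)), (0, 1), (-1, 0), (0, -1)]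
          (fun d hd => pvAdj_of_delta hd) _ _ hmid
        have hAin : pvAInv g rows cols (([((1 : Int), (0 : Int)), (0, 1), (-1, 0), (0, -1)]).foldl
              (pvStepDir g rows cols (pvHeapMin x xs).2.1 (pvHeapMin x xs).2.2)
              ((x :: xs).erase (pvHeapMin x xs), visited)).1 (([((1 : Int), (0 : Int)), (0, 1), (-1, 0), (0, -1)]).foldl
              (pvStepDir g rows cols (pvHeapMin x xs).2.1 (pvHeapMin x xs).2.2)
              ((x :: xs).erase (pvHeapMin x xs), visited)).2
            (min answer (-(pvHeapMin x xs).1)) ((pvHeapMin x xs).2 :: P) := by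
          refine ⟨inv.hrows, inv.hcols, inv.hpre, hmid2.hshape, hmid2.hwf, ?_, hmid2.hnodup,
            ?_, hmid2.hdisj, hmid2.hvis, ?_, ?_, ?_, hdeltaNew, hmid2.hJ⟩
          · intro p hp
            rcases List.mem_cons.1 hp with h | h
            · subst h; exact hcurin
            · exact inv.hPwf p h
          · refine List.nodup_cons.2 ⟨?_, inv.hPnodup⟩
            intro hc
            exact inv.hdisj _ hc (List.mem_map.2 ⟨_, hcurmem, rfl⟩)
          · rcases inv.hstart with h | h
            · exact Or.inl (List.mem_cons.2 (Or.inr h))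
            · rcases (hmemcells _).1 h with h2 | h2
              · exact Or.inl (by rw [h2]; exact List.mem_cons_self)
              · exact Or.inr (hmono _ h2)
          · intro p hp q hq hadj
            rcases List.mem_cons.1 hp with h | h
            · subst h
              obtain ⟨d, hd, hqd⟩ := pvAdj_delta hadj
              rw [hqd]
              exact hcov d hd (hqd ▸ hq)
            · rcases inv.hclosed p h q hq hadj with h2 | h2
              · exact Or.inl (List.mem_cons.2 (Or.inr h2))
              · rcases (hmemcells _).1 h2 with h3 | h3
                · exact Or.inl (by rw [h3]; exact List.mem_cons_self)
                · exact Or.inr (hmono _ h3)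
          · intro hc
            rcases List.mem_cons.1 hc with h | h
            · exact hneq h.symm
            · exact inv.hend h
        rw [hunf, if_neg hcond]
        exact ih _ _ _ _ hAin hfuel2
theorem pvA_correct {g : List (List Int)} (hpre : Pre_maximumMinimumPath g) :
    pvReach g (g.length : Int) ((g.headD []).length : Int) (maximumMinimumPath g)
      ((g.length : Int) - 1, ((g.headD []).length : Int) - 1) ∧
    ∀ t, pvReach g (g.length : Int) ((g.headD []).length : Int) t
      ((g.length : Int) - 1, ((g.headD []).length : Int) - 1) → t ≤ maximumMinimumPath g := by
  set rows : Int := (g.length : Int) with hrows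
  set cols : Int := ((g.headD []).length : Int) with hcols
  obtain ⟨hr1, hc1⟩ := pvDims hrows hcols hpre
  have h00 : pvInb rows cols (0, 0) := ⟨le_refl _, by omega, le_refl _, by omega⟩
  have hunf : maximumMinimumPath g = pvALoop g rows cols (rows.toNat * cols.toNat + 1)
      [(-(pvGet2 g 0 0), 0, 0)]
      (pvSetB (List.replicate rows.toNat (List.replicate cols.toNat false)) 0 0)
      (pvGet2 g 0 0) := rfl
  have hinv : pvAInv g rows cols [(-(pvGet2 g 0 0), 0, 0)]
      (pvSetB (List.replicate rows.toNat (List.replicate cols.toNat false)) 0 0)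
      (pvGet2 g 0 0) [] := by
    refine ⟨hrows, hcols, hpre, pvShape_setB pvShape_replicate h00, ?_, by simp,
      by simp [pvCells], by simp, by simp, ?_, ?_, by simp, by simp, ?_, ?_⟩
    · intro x hx
      rw [List.mem_singleton] at hx
      subst hx
      exact ⟨h00, rfl⟩
    · intro p hinp
      obtain ⟨pa, pb⟩ := p
      rw [pvGetB_init h00 hinp]
      simp only [List.not_mem_nil, false_or, pvCells, List.map_cons, List.map_nil,
        List.mem_singleton, Prod.mk.injEq]
      split
      · next h => simp [h.1, h.2]
      · next h => simp only [Bool.false_eq_true, false_iff]; exact fun hc => h ⟨hc.1, hc.2⟩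
    · exact Or.inr (by simp [pvCells])
    · intro t ht
      exact pvReach_start_le ht
    · intro x hx
      rw [List.mem_singleton] at hx
      subst hx
      show pvReach g rows cols (min (pvGet2 g 0 0) (pvGet2 g 0 0)) (0, 0)
      rw [min_self]
      exact .start (le_refl _)
  rw [hunf]
  exact pvALoop_spec _ _ _ _ _ hinv (by simp)

-- ---------- B-side: the flood fill decides pvReach ----------

structure pvBInv (g : List (List Int)) (rows cols t : Int) (stack : List (Int × Int))
    (seen : List (List Bool)) (S : List (Int × Int)) : Prop where
  hrows : rows = (g.length : Int)
  hcols : cols = ((g.headD []).length : Int)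
  hpre : Pre_maximumMinimumPath g
  hshape : pvShape seen rows cols
  hSwf : ∀ p ∈ S, pvInb rows cols p
  hSnodup : S.Nodup
  hstackNodup : stack.Nodup
  hstack : ∀ p ∈ stack, p ∈ S
  hseen : ∀ p, pvInb rows cols p → (pvGetB seen p.1 p.2 = true ↔ p ∈ S)
  hsound : ∀ p ∈ S, pvReach g rows cols t p
  hstart : (0, 0) ∈ S
  hclosed : ∀ p ∈ S, p ∉ stack → ∀ q, pvInb rows cols q → pvAdj p q →
    t ≤ pvVal g q → q ∈ S

structure pvBMid (g : List (List Int)) (rows cols t : Int) (stack : List (Int × Int))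
    (seen : List (List Bool)) (S : List (Int × Int)) : Prop where
  hshape : pvShape seen rows cols
  hSwf : ∀ p ∈ S, pvInb rows cols p
  hSnodup : S.Nodup
  hstackNodup : stack.Nodup
  hstack : ∀ p ∈ stack, p ∈ S
  hseen : ∀ p, pvInb rows cols p → (pvGetB seen p.1 p.2 = true ↔ p ∈ S)
  hsound : ∀ p ∈ S, pvReach g rows cols t p

theorem pvBFold {g : List (List Int)} {rows cols t : Int} {r c : Int}
    (hreach : pvReach g rows cols t (r, c)) :
    ∀ (qs : List (Int × Int)), (∀ q ∈ qs, pvAdj (r, c) q) →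
    ∀ (stack : List (Int × Int)) (seen : List (List Bool)) (S : List (Int × Int)),
    pvBMid g rows cols t stack seen S →
    ∃ (new : List (Int × Int)) (S2 : List (Int × Int)),
      (qs.foldl (fun (st : List (Int × Int) × List (List Bool)) q =>
        if decide (0 ≤ q.1) && decide (q.1 < rows) && decide (0 ≤ q.2) && decide (q.2 < cols)
            && !pvGetB st.2 q.1 q.2 && decide (t ≤ pvGet2 g q.1 q.2) then
          (q :: st.1, pvSetB st.2 q.1 q.2)
        else st) (stack, seen)).1 = new ++ stack ∧
      pvBMid g rows cols t (new ++ stack)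
        (qs.foldl (fun (st : List (Int × Int) × List (List Bool)) q =>
          if decide (0 ≤ q.1) && decide (q.1 < rows) && decide (0 ≤ q.2) && decide (q.2 < cols)
              && !pvGetB st.2 q.1 q.2 && decide (t ≤ pvGet2 g q.1 q.2) then
            (q :: st.1, pvSetB st.2 q.1 q.2)
          else st) (stack, seen)).2 S2 ∧
      (∀ p, p ∈ S2 ↔ p ∈ S ∨ p ∈ new) ∧
      S2.length = S.length + new.length ∧
      (∀ q ∈ qs, pvInb rows cols q → t ≤ pvVal g q → q ∈ S2) := by
  intro qs
  induction qs with
  | nil =>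
    intro _ stack seen S hmid
    exact ⟨[], S, rfl, hmid, by simp, by simp, by simp⟩
  | cons q qs ih =>
    intro hqs stack seen S hmid
    obtain ⟨qa, qb⟩ := q
    by_cases hcond : (decide (0 ≤ qa) && decide (qa < rows) && decide (0 ≤ qb) && decide (qb < cols)
        && !pvGetB seen qa qb && decide (t ≤ pvGet2 g qa qb)) = true
    · -- the neighbor is pushed and marked
      have hparts := hcond
      simp only [Bool.and_eq_true, decide_eq_true_eq, Bool.not_eq_eq_eq_not, Bool.not_true] at hparts
      obtain ⟨⟨⟨⟨⟨h1, h2⟩, h3⟩, h4⟩, h5⟩, h6⟩ := hparts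
      have hin : pvInb rows cols (qa, qb) := ⟨h1, h2, h3, h4⟩
      have hnotS : (qa, qb) ∉ S := fun hmem => by
        have := (hmid.hseen _ hin).2 hmem
        simp [this] at h5
      have hreachq : pvReach g rows cols t (qa, qb) :=
        .step hreach hin (hqs _ (List.mem_cons_self)) h6
      have hmid' : pvBMid g rows cols t ((qa, qb) :: stack) (pvSetB seen qa qb)
          ((qa, qb) :: S) := by
        refine ⟨pvShape_setB hmid.hshape hin, ?_, ?_, ?_, ?_, ?_, ?_⟩
        · intro p hp
          rcases List.mem_cons.1 hp with h | h
          · subst h; exact hin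
          · exact hmid.hSwf p h
        · exact List.nodup_cons.2 ⟨hnotS, hmid.hSnodup⟩
        · exact List.nodup_cons.2 ⟨fun hc => hnotS (hmid.hstack _ hc), hmid.hstackNodup⟩
        · intro p hp
          rcases List.mem_cons.1 hp with h | h
          · subst h; exact List.mem_cons_self
          · exact List.mem_cons.2 (Or.inr (hmid.hstack p h))
        · intro p hinp
          rw [pvGetB_setB hmid.hshape hin hinp]
          constructor
          · intro hb
            split at hb
            · next he =>
              obtain ⟨pa, pb⟩ := p
              have hpq : (pa, pb) = (qa, qb) := by
                simp only [Prod.mk.injEq]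
                exact he
              exact List.mem_cons.2 (Or.inl hpq)
            · exact List.mem_cons.2 (Or.inr ((hmid.hseen p hinp).1 hb))
          · intro hmem
            rcases List.mem_cons.1 hmem with h | h
            · subst h; simp
            · split
              · rfl
              · exact (hmid.hseen p hinp).2 h
        · intro p hp
          rcases List.mem_cons.1 hp with h | h
          · subst h; exact hreachq
          · exact hmid.hsound p h
      obtain ⟨new, S2, hst, hmid2, hS2, hlen, hcov⟩ :=
        ih (fun q hq => hqs q (List.mem_cons.2 (Or.inr hq))) _ _ _ hmid'
      refine ⟨new ++ [(qa, qb)], S2, ?_, ?_, ?_, ?_, ?_⟩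
      · simp only [List.foldl_cons, hcond]
        rw [List.append_assoc, List.singleton_append]
        exact hst
      · have : new ++ (qa, qb) :: stack = (new ++ [(qa, qb)]) ++ stack := by simp
        rw [← this]
        simpa only [List.foldl_cons, hcond] using hmid2
      · intro p
        rw [hS2]
        simp only [List.mem_cons, List.mem_append]
        tauto
      · rw [hlen]; simp; omega
      · intro w hw hwin hwval
        rcases List.mem_cons.1 hw with h | h
        · subst h
          exact (hS2 _).2 (Or.inl List.mem_cons_self)
        · exact hcov w h hwin hwval
    · -- condition false: nothing changes for this neighbor
      obtain ⟨new, S2, hst, hmid2, hS2, hlen, hcov⟩ :=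
        ih (fun q hq => hqs q (List.mem_cons.2 (Or.inr hq))) stack seen S hmid
      refine ⟨new, S2, ?_, ?_, hS2, hlen, ?_⟩
      · simpa only [List.foldl_cons, if_neg hcond] using hst
      · simpa only [List.foldl_cons, if_neg hcond] using hmid2
      · intro w hw hwin hwval
        rcases List.mem_cons.1 hw with h | h
        · subst h
          -- the failing conjunct must be the seen-test: w is already in S
          have hb : pvGetB seen qa qb = true := by
            by_contra hb
            apply hcond
            simp only [Bool.and_eq_true, decide_eq_true_eq, Bool.not_eq_eq_eq_not, Bool.not_true]
            obtain ⟨k1, k2, k3, k4⟩ := hwin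
            exact ⟨⟨⟨⟨⟨k1, k2⟩, k3⟩, k4⟩, by simpa using hb⟩, hwval⟩
          have : (qa, qb) ∈ S := (hmid.hseen _ hwin).1 hb
          exact (hS2 _).2 (Or.inl this)
        · exact hcov w h hwin hwval

theorem pvBLoop_spec {g : List (List Int)} {rows cols t : Int} (fuel : Nat)
    (stack : List (Int × Int)) (seen : List (List Bool)) (S : List (Int × Int))
    (inv : pvBInv g rows cols t stack seen S)
    (hfuel : stack.length + (rows.toNat * cols.toNat - S.length) ≤ fuel) :
    ∃ SF : List (Int × Int), (∀ p ∈ S, p ∈ SF) ∧ (∀ p ∈ SF, pvInb rows cols p) ∧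
      (∀ p, pvInb rows cols p →
        (pvGetB (pvBLoop g rows cols t fuel stack seen) p.1 p.2 = true ↔ p ∈ SF)) ∧
      (∀ p ∈ SF, pvReach g rows cols t p) ∧ (0, 0) ∈ SF ∧
      (∀ p ∈ SF, ∀ q, pvInb rows cols q → pvAdj p q → t ≤ pvVal g q → q ∈ SF) := by
  induction fuel generalizing stack seen S with
  | zero =>
    have hemp : stack = [] := by
      cases stack with
      | nil => rfl
      | cons a l => simp at hfuel
    subst hemp
    refine ⟨S, fun p hp => hp, inv.hSwf, fun p hp => inv.hseen p hp, inv.hsound,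
      inv.hstart, ?_⟩
    intro p hp q hq hadj hval
    exact inv.hclosed p hp (by simp) q hq hadj hval
  | succ fuel ih =>
    cases stack with
    | nil =>
      refine ⟨S, fun p hp => hp, inv.hSwf, fun p hp => inv.hseen p hp, inv.hsound,
        inv.hstart, ?_⟩
      intro p hp q hq hadj hval
      exact inv.hclosed p hp (by simp) q hq hadj hval
    | cons rc rest =>
      obtain ⟨r, c⟩ := rc
      have hreach : pvReach g rows cols t (r, c) := inv.hsound _ (inv.hstack _ List.mem_cons_self)
      have hmid : pvBMid g rows cols t rest seen S :=
        ⟨inv.hshape, inv.hSwf, inv.hSnodup, (List.nodup_cons.1 inv.hstackNodup).2,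
          fun p hp => inv.hstack p (List.mem_cons.2 (Or.inr hp)), inv.hseen, inv.hsound⟩
      have hqs : ∀ q ∈ [(r + 1, c), (r - 1, c), (r, c + 1), (r, c - 1)], pvAdj (r, c) q :=
        fun q hq => pvAdj_iff_mem.2 hq
      obtain ⟨new, S2, hst, hmid2, hS2, hlen, hcov⟩ :=
        pvBFold hreach _ hqs rest seen S hmid
      have hS2len : S2.length ≤ rows.toNat * cols.toNat :=
        pvNodup_length_le hmid2.hSnodup hmid2.hSwf
      have hSsub : S.length ≤ S2.length := by omega
      have hinv2 : pvBInv g rows cols t (new ++ rest)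
          ((([(r + 1, c), (r - 1, c), (r, c + 1), (r, c - 1)]).foldl
            (fun (st : List (Int × Int) × List (List Bool)) q =>
              if decide (0 ≤ q.1) && decide (q.1 < rows) && decide (0 ≤ q.2) && decide (q.2 < cols)
                  && !pvGetB st.2 q.1 q.2 && decide (t ≤ pvGet2 g q.1 q.2) then
                (q :: st.1, pvSetB st.2 q.1 q.2)
              else st) (rest, seen)).2) S2 := by
        refine ⟨inv.hrows, inv.hcols, inv.hpre, hmid2.hshape, hmid2.hSwf, hmid2.hSnodup,
          hmid2.hstackNodup, hmid2.hstack, hmid2.hseen, hmid2.hsound, ?_, ?_⟩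
        · exact (hS2 _).2 (Or.inl inv.hstart)
        · intro p hp hpnot q hq hadj hval
          rcases (hS2 p).1 hp with hpS | hpnew
          · by_cases hpc : p = (r, c)
            · subst hpc
              exact hcov q (pvAdj_iff_mem.1 hadj) hq hval
            · have hpnotstack : p ∉ (r, c) :: rest := by
                intro hmem
                rcases List.mem_cons.1 hmem with h | h
                · exact hpc h
                · exact hpnot (List.mem_append.2 (Or.inr h))
              exact (hS2 _).2 (Or.inl (inv.hclosed p hpS hpnotstack q hq hadj hval))
          · exact absurd (List.mem_append.2 (Or.inl hpnew)) hpnot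
      have hfuel2 : (new ++ rest).length + (rows.toNat * cols.toNat - S2.length) ≤ fuel := by
        simp only [List.length_append]
        simp only [List.length_cons] at hfuel
        omega
      have := ih (new ++ rest) _ S2 hinv2 hfuel2
      obtain ⟨SF, w1, w2, w3, w4, w5, w6⟩ := this
      refine ⟨SF, fun p hp => w1 p ((hS2 p).2 (Or.inl hp)), w2, ?_, w4, w5, w6⟩
      intro p hp
      have hrw : pvBLoop g rows cols t (fuel + 1) ((r, c) :: rest) seen =
          pvBLoop g rows cols t fuel (([(r + 1, c), (r - 1, c), (r, c + 1), (r, c - 1)]).foldl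
            (fun (st : List (Int × Int) × List (List Bool)) q =>
              if decide (0 ≤ q.1) && decide (q.1 < rows) && decide (0 ≤ q.2) && decide (q.2 < cols)
                  && !pvGetB st.2 q.1 q.2 && decide (t ≤ pvGet2 g q.1 q.2) then
                (q :: st.1, pvSetB st.2 q.1 q.2)
              else st) (rest, seen)).1 (([(r + 1, c), (r - 1, c), (r, c + 1), (r, c - 1)]).foldl
            (fun (st : List (Int × Int) × List (List Bool)) q =>
              if decide (0 ≤ q.1) && decide (q.1 < rows) && decide (0 ≤ q.2) && decide (q.2 < cols)
                  && !pvGetB st.2 q.1 q.2 && decide (t ≤ pvGet2 g q.1 q.2) then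
                (q :: st.1, pvSetB st.2 q.1 q.2)
              else st) (rest, seen)).2 := rfl
      rw [hrw, hst]
      exact w3 p hp

theorem pvConnected_iff {g : List (List Int)} {rows cols : Int} (t : Int)
    (hrows : rows = (g.length : Int)) (hcols : cols = ((g.headD []).length : Int))
    (hpre : Pre_maximumMinimumPath g) :
    pvConnected g rows cols t = true ↔ pvReach g rows cols t (rows - 1, cols - 1) := by
  obtain ⟨hr1, hc1⟩ := pvDims hrows hcols hpre
  have h00 : pvInb rows cols (0, 0) := ⟨le_refl _, by omega, le_refl _, by omega⟩
  have hendin : pvInb rows cols (rows - 1, cols - 1) := ⟨by omega, by omega, by omega, by omega⟩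
  by_cases hv : pvGet2 g 0 0 < t
  · rw [pvConnected, if_pos hv]
    refine iff_of_false (by simp) (fun hr => ?_)
    have := pvReach_start_le hr
    rw [pvVal] at this
    dsimp only at this
    omega
  · rw [pvConnected, if_neg hv]
    rw [not_lt] at hv
    have hinv : pvBInv g rows cols t [(0, 0)]
        (pvSetB (List.replicate rows.toNat (List.replicate cols.toNat false)) 0 0) [(0, 0)] := by
      refine ⟨hrows, hcols, hpre, pvShape_setB pvShape_replicate h00, ?_, by simp, by simp,
        by simp, ?_, ?_, by simp, ?_⟩
      · intro p hp
        rw [List.mem_singleton] at hp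
        subst hp
        exact h00
      · intro p hinp
        obtain ⟨pa, pb⟩ := p
        rw [pvGetB_init h00 hinp]
        simp only [List.mem_singleton, Prod.mk.injEq]
        split
        · next h => simp [h.1, h.2]
        · next h => simp only [Bool.false_eq_true, false_iff]; exact fun hc => h ⟨hc.1, hc.2⟩
      · intro p hp
        rw [List.mem_singleton] at hp
        subst hp
        exact .start hv
      · intro p hp hnot
        rw [List.mem_singleton] at hp
        subst hp
        exact absurd List.mem_cons_self hnot
    have hnm : 1 ≤ rows.toNat * cols.toNat := Nat.mul_pos (by omega) (by omega)
    obtain ⟨SF, w1, w2, w3, w4, w5, w6⟩ := pvBLoop_spec (rows.toNat * cols.toNat + 1)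
      _ _ _ hinv (by simp; omega)
    constructor
    · intro hb
      exact w4 _ ((w3 (rows - 1, cols - 1) hendin).1 hb)
    · intro hr
      have hcl : ∀ z, pvReach g rows cols t z → z ∈ SF := by
        intro z hz
        induction hz with
        | start h => exact w5
        | step hp hin hadj hval ih => exact w6 _ ih _ hin hadj hval
      exact (w3 (rows - 1, cols - 1) hendin).2 (hcl _ hr)

-- ---------- B-side: the descending scan ----------

theorem pvConnected_mono {g : List (List Int)} {rows cols : Int} {st t : Int}
    (hrows : rows = (g.length : Int)) (hcols : cols = ((g.headD []).length : Int))
    (hpre : Pre_maximumMinimumPath g) (hle : st ≤ t)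
    (h : pvConnected g rows cols t = true) : pvConnected g rows cols st = true := by
  rw [pvConnected_iff t hrows hcols hpre] at h
  rw [pvConnected_iff st hrows hcols hpre]
  exact pvReach_mono hle h

theorem pvBSearch_spec {g : List (List Int)} {rows cols : Int} (vals : List Int)
    (fuel lo hi : Nat) (hlohi : lo ≤ hi) (hhi : hi < vals.length)
    (hChi : pvConnected g rows cols (vals.getD hi 0) = true)
    (hlow : ∀ k < lo, ¬ pvConnected g rows cols (vals.getD k 0) = true)
    (hmono : ∀ i j, i ≤ j → j < vals.length → pvConnected g rows cols (vals.getD i 0) = true →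
      pvConnected g rows cols (vals.getD j 0) = true)
    (hfuel : hi - lo ≤ fuel) :
    ∃ i, lo ≤ i ∧ i ≤ hi ∧ pvBSearch g rows cols vals fuel lo hi = vals.getD i 0 ∧
      pvConnected g rows cols (vals.getD i 0) = true ∧
      (∀ k < i, ¬ pvConnected g rows cols (vals.getD k 0) = true) := by
  induction fuel generalizing lo hi with
  | zero =>
    have : lo = hi := by omega
    subst this
    exact ⟨lo, le_refl _, le_refl _, rfl, hChi, hlow⟩
  | succ fuel ih =>
    by_cases hlt : lo < hi
    · have hmid1 : lo ≤ (lo + hi) / 2 := by omega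
      have hmid2 : (lo + hi) / 2 < hi := by omega
      by_cases hc : pvConnected g rows cols (vals.getD ((lo + hi) / 2) 0) = true
      · have hunf : pvBSearch g rows cols vals (fuel + 1) lo hi =
            pvBSearch g rows cols vals fuel lo ((lo + hi) / 2) := by
          rw [pvBSearch, if_pos hlt]
          exact if_pos hc
        obtain ⟨i, h1, h2, h3, h4, h5⟩ := ih lo ((lo + hi) / 2) hmid1 (by omega) hc hlow
          (by omega)
        exact ⟨i, h1, by omega, hunf ▸ h3, h4, h5⟩
      · have hunf : pvBSearch g rows cols vals (fuel + 1) lo hi =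
            pvBSearch g rows cols vals fuel ((lo + hi) / 2 + 1) hi := by
          rw [pvBSearch, if_pos hlt]
          exact if_neg hc
        have hlow' : ∀ k < (lo + hi) / 2 + 1, ¬ pvConnected g rows cols (vals.getD k 0) = true := by
          intro k hk
          by_cases hklo : k < lo
          · exact hlow k hklo
          · intro hck
            exact hc (hmono k ((lo + hi) / 2) (by omega) (by omega) hck)
        obtain ⟨i, h1, h2, h3, h4, h5⟩ := ih ((lo + hi) / 2 + 1) hi (by omega) hhi hChi hlow'
          (by omega)
        exact ⟨i, by omega, h2, hunf ▸ h3, h4, h5⟩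
    · have : lo = hi := by omega
      subst this
      exact ⟨lo, le_refl _, le_refl _, by rw [pvBSearch, if_neg hlt], hChi, hlow⟩

theorem pvB_correct {g : List (List Int)} (hpre : Pre_maximumMinimumPath g) :
    pvReach g (g.length : Int) ((g.headD []).length : Int) (maximumMinimumPath_alt g)
      ((g.length : Int) - 1, ((g.headD []).length : Int) - 1) ∧
    ∀ t, pvReach g (g.length : Int) ((g.headD []).length : Int) t
      ((g.length : Int) - 1, ((g.headD []).length : Int) - 1) → t ≤ maximumMinimumPath_alt g := by
  set rows : Int := (g.length : Int) with hrows
  set cols : Int := ((g.headD []).length : Int) with hcols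
  set vals := PySem.List.sorted
    (PySem.Set.ofList ((PySem.List.pyRange 0 rows 1).flatMap
      (fun r => (PySem.List.pyRange 0 cols 1).map (fun c => pvGet2 g r c))))
    (fun x => x) true with hvals
  have halt : maximumMinimumPath_alt g = pvBSearch g rows cols vals vals.length 0
      (vals.length - 1) := rfl
  have hmem : ∀ v, v ∈ vals ↔ ∃ p, pvInb rows cols p ∧ v = pvVal g p := by
    intro v
    rw [hvals, PySem.List.mem_sorted, PySem.Set.mem_ofList, List.mem_flatMap]
    constructor
    · rintro ⟨r, hr, hv⟩
      rw [List.mem_map] at hv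
      obtain ⟨c, hc, hvc⟩ := hv
      rw [PySem.List.mem_pyRange_one] at hr hc
      exact ⟨(r, c), ⟨hr.1, hr.2, hc.1, hc.2⟩, hvc.symm⟩
    · rintro ⟨⟨pa, pb⟩, hin, hv⟩
      refine ⟨pa, PySem.List.mem_pyRange_one.2 ⟨hin.1, hin.2.1⟩, List.mem_map.2
        ⟨pb, PySem.List.mem_pyRange_one.2 ⟨hin.2.2.1, hin.2.2.2⟩, hv.symm⟩⟩
  have hpair : vals.Pairwise (· > ·) := by
    have hge : vals.Pairwise (fun a b => b ≤ a) := by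
      simpa using PySem.List.sorted_pairwise_rev
        (PySem.Set.ofList ((PySem.List.pyRange 0 rows 1).flatMap
          (fun r => (PySem.List.pyRange 0 cols 1).map (fun c => pvGet2 g r c)))) (fun x => x)
    have hnd : vals.Nodup := by
      rw [hvals]
      exact (PySem.List.sorted_perm _ _ _).nodup_iff.2 (PySem.Set.nodup_ofList _)
    exact (hge.and hnd).imp (fun hab => lt_of_le_of_ne hab.1 (Ne.symm hab.2))
  have hidx : ∀ i j, i ≤ j → j < vals.length → vals.getD j 0 ≤ vals.getD i 0 := by
    intro i j hij hj
    rcases Nat.lt_or_ge i j with hlt | hge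
    · have := (List.pairwise_iff_getElem.1 hpair) i j (by omega) hj hlt
      rw [List.getD_eq_getElem vals 0 hj,
        List.getD_eq_getElem vals 0 (show i < vals.length by omega)]
      omega
    · have : i = j := by omega
      subst this
      exact le_refl _
  have hmono : ∀ i j, i ≤ j → j < vals.length →
      pvConnected g rows cols (vals.getD i 0) = true →
      pvConnected g rows cols (vals.getD j 0) = true :=
    fun i j hij hj hc => pvConnected_mono hrows hcols hpre (hidx i j hij hj) hc
  have hsome : ∃ v ∈ vals, pvConnected g rows cols v = true := by
    obtain ⟨t, ht⟩ := pvExists_reach_end hrows hcols hpre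
    obtain ⟨hr1, hc1⟩ := pvDims hrows hcols hpre
    obtain ⟨w, _, hw2, p, hp, hwp⟩ := pvReach_attained
      ⟨le_refl _, by omega, le_refl _, by omega⟩ ht
    exact ⟨w, (hmem w).2 ⟨p, hp, hwp⟩, (pvConnected_iff w hrows hcols hpre).2 hw2⟩
  obtain ⟨w0, hw0mem, hw0c⟩ := hsome
  have hlen : 0 < vals.length := List.length_pos_of_mem hw0mem
  obtain ⟨jw, hjw, hjweq⟩ := List.mem_iff_getElem.1 hw0mem
  have hCjw : pvConnected g rows cols (vals.getD jw 0) = true := by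
    rw [List.getD_eq_getElem vals 0 hjw, hjweq]
    exact hw0c
  have hClast : pvConnected g rows cols (vals.getD (vals.length - 1) 0) = true :=
    hmono jw (vals.length - 1) (by omega) (by omega) hCjw
  obtain ⟨i0, _, hi0hi, hres, hci0, hlow0⟩ := pvBSearch_spec vals vals.length 0
    (vals.length - 1) (by omega) (by omega) hClast (fun k hk => absurd hk (Nat.not_lt_zero k))
    hmono (by omega)
  rw [halt, hres]
  constructor
  · exact (pvConnected_iff _ hrows hcols hpre).1 hci0
  · intro t ht
    obtain ⟨hr1, hc1⟩ := pvDims hrows hcols hpre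
    obtain ⟨w, hw1, hw2, p, hp, hwp⟩ := pvReach_attained
      ⟨le_refl _, by omega, le_refl _, by omega⟩ ht
    have hwmem : w ∈ vals := (hmem w).2 ⟨p, hp, hwp⟩
    obtain ⟨j, hj, hjeq⟩ := List.mem_iff_getElem.1 hwmem
    have hCj : pvConnected g rows cols (vals.getD j 0) = true := by
      rw [List.getD_eq_getElem vals 0 hj, hjeq]
      exact (pvConnected_iff w hrows hcols hpre).2 hw2
    have hji : i0 ≤ j := by
      by_contra hji
      exact (hlow0 j (by omega)) hCj
    have hgoal := hidx i0 j hji hj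
    have hweq : vals.getD j 0 = w := by
      rw [List.getD_eq_getElem vals 0 hj]
      exact hjeq
    rw [hweq] at hgoal
    omega

-- ===== VERDICT (by name: the statement is the Claim_ definition above) =====
theorem maximumMinimumPath_spec : Claim_equal_maximumMinimumPath := by
  intro grid _ hpre
  unfold Spec_maximumMinimumPath
  have hA := pvA_correct hpre
  have hB := pvB_correct hpre
  exact le_antisymm (hB.2 _ hA.1) (hA.2 _ hB.1)
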